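-- pv_equiv track=rewrite | github.com/allanRoberto/revesbot-final | apps/signals/patterns/api_monitor.py | detect_number_return_after_trigger
-- ===== SOURCE A (Python) =====
-- from typing import Optional, List, Tuple, Set
--
-- def detect_number_return_after_trigger(numbers: List[int], history_window: int = 5) -> bool:
--     """
--     Detecta retorno de numero apos o gatilho.
--     Verifica se algum numero que estava antes do gatilho apareceu logo depois.
--     Exemplo: 32 > 4 > 4 > 28 > 32
--
--     Nota: Como estamos no momento do gatilho, verificamos o historico recente
--     para identificar numeros que poderiam "retornar" nas proximas rodadas.
--
--     Retorna: True se deve cancelar, False se nao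
--     """
--     # Esta funcao e mais relevante apos o gatilho ser processado
--     # Por enquanto, verificamos padroes suspeitos
--     if len(numbers) < 4:
--         return False
--
--     # Verifica se ha um numero que apareceu duas vezes perto do gatilho
--     recent = numbers[1:history_window] if len(numbers) >= history_window else numbers[1:]
--
--     for i, num in enumerate(recent):
--         for j in range(i + 1, len(recent)):
--             if recent[j] == num:
--                 # Numero repetido na janela proxima ao gatilho
--                 # Isso pode indicar que ele vai "retornar"
--                 return True
--
--     return False
-- ===== SOURCE B (Python) =====
-- def detect_number_return_after_trigger(numbers, history_window=5):
--     if len(numbers) < 4: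
--         return False
--     recent = numbers[1:history_window] if len(numbers) >= history_window else numbers[1:]
--     seen = set()
--     for num in recent:
--         if num in seen:
--             return True
--         seen.add(num)
--     return False
-- ===== Notes on version B (the rewrite author's own statement) =====
-- stated objective: simpler
-- what changed: replaces the nested index double loop over the window with a single pass maintaining a seen-set, returning True on the first repeated element
import Mathlib
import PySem

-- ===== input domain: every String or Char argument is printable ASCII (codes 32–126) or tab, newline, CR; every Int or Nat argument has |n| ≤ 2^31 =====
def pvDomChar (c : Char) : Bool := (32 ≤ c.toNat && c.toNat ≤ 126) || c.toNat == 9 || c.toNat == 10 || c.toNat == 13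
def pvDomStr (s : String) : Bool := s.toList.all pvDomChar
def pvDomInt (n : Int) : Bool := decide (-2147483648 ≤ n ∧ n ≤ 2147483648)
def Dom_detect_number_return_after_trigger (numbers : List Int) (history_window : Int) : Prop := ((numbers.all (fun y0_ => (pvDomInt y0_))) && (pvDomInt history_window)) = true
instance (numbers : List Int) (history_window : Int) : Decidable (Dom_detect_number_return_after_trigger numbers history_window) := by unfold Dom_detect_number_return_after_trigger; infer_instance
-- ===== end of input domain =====

-- B replaces A's nested O(w^2) index double loop by a single pass with a seen-set (objective: simpler).

-- ===== PORT A =====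
-- inner loop: for j in range(i + 1, len(recent)): if recent[j] == num: return True
def pvLoopJ (recent : List Int) (num : Int) (j : Nat) : Bool :=
  if h : j < recent.length then
    if recent[j] == num then true else pvLoopJ recent num (j + 1)
  else false
termination_by recent.length - j

-- outer loop: for i, num in enumerate(recent): …
def pvLoopI (recent : List Int) (i : Nat) : Bool :=
  if h : i < recent.length then
    if pvLoopJ recent recent[i] (i + 1) then true else pvLoopI recent (i + 1)
  else false
termination_by recent.length - i

def detect_number_return_after_trigger (numbers : List Int) (history_window : Int) : Bool :=
  if numbers.length < 4 then false
  else
    let recent := if (numbers.length : Int) ≥ history_window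
      then PySem.List.slice numbers (some 1) (some history_window)
      else PySem.List.slice numbers (some 1) none
    pvLoopI recent 0

-- ===== PORT B =====
-- single pass: for num in recent: if num in seen: return True; seen.add(num)
def pvSeenLoop (xs : List Int) (seen : PySem.Set Int) : Bool :=
  match xs with
  | [] => false
  | n :: rest => if PySem.Set.contains seen n then true else pvSeenLoop rest (PySem.Set.add seen n)

def detect_number_return_after_trigger_alt (numbers : List Int) (history_window : Int) : Bool :=
  if numbers.length < 4 then false
  else
    let recent := if (numbers.length : Int) ≥ history_window
      then PySem.List.slice numbers (some 1) (some history_window)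
      else PySem.List.slice numbers (some 1) none
    pvSeenLoop recent PySem.Set.empty

-- ===== PRECONDITION & SPEC =====
def Spec_detect_number_return_after_trigger (numbers : List Int) (history_window : Int) (out : Bool) : Prop := out = detect_number_return_after_trigger_alt numbers history_window
instance (numbers : List Int) (history_window : Int) (out : Bool) : Decidable (Spec_detect_number_return_after_trigger numbers history_window out) := by unfold Spec_detect_number_return_after_trigger; infer_instance

-- ===== CLAIM (what is proved, stated in full; the proofs are below) =====
def Claim_equal_detect_number_return_after_trigger : Prop := ∀ (numbers : List Int) (history_window : Int), Dom_detect_number_return_after_trigger numbers history_window → Spec_detect_number_return_after_trigger numbers history_window (detect_number_return_after_trigger numbers history_window)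

-- ===== LEMMAS AND PROOFS =====

-- both loops detect "some element repeats later"; this structural scan is the common reference point
def pvDupScan : List Int → Bool
  | [] => false
  | n :: rest => rest.contains n || pvDupScan rest

theorem pvLoopJ_eq (recent : List Int) (num : Int) (j : Nat) :
    pvLoopJ recent num j = (recent.drop j).contains num := by
  fun_induction pvLoopJ recent num j with
  | case1 j h heq =>
      rw [List.drop_eq_getElem_cons h]
      simp_all
  | case2 j h heq ih =>
      rw [List.drop_eq_getElem_cons h, ih]
      simp only [List.contains_eq_mem, List.mem_cons, decide_eq_decide]
      constructor
      · exact Or.inr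
      · rintro (h' | h')
        · exact absurd h'.symm (by simpa using heq)
        · exact h'
  | case3 j h =>
      rw [List.drop_eq_nil_iff.mpr (by omega)]
      simp

theorem pvLoopI_eq (recent : List Int) (i : Nat) :
    pvLoopI recent i = pvDupScan (recent.drop i) := by
  fun_induction pvLoopI recent i with
  | case1 i h heq =>
      rw [List.drop_eq_getElem_cons h, pvDupScan]
      rw [pvLoopJ_eq] at heq
      rw [heq, Bool.true_or]
  | case2 i h heq ih =>
      rw [List.drop_eq_getElem_cons h, pvDupScan, ← ih]
      rw [pvLoopJ_eq] at heq
      simp_all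
  | case3 i h =>
      rw [List.drop_eq_nil_iff.mpr (by omega)]
      rfl

theorem pvSeenLoop_eq (xs : List Int) (seen : PySem.Set Int) :
    pvSeenLoop xs seen = (xs.any (fun n => PySem.Set.contains seen n) || pvDupScan xs) := by
  induction xs generalizing seen with
  | nil => rfl
  | cons n rest ih =>
      rw [pvSeenLoop, pvDupScan, List.any_cons]
      by_cases hc : PySem.Set.contains seen n = true
      · have hm : n ∈ seen := by simpa using hc
        simp [hm]
      · have hcf : PySem.Set.contains seen n = false := by
          exact Bool.not_eq_true _ |>.mp hc
        rw [if_neg hc, ih, hcf, Bool.false_or]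
        rw [Bool.eq_iff_iff]
        simp only [Bool.or_eq_true, List.any_eq_true, PySem.Set.contains_iff,
          PySem.Set.mem_add, List.contains_eq_mem, decide_eq_true_eq]
        constructor
        · rintro (⟨m, hm, h | h⟩ | h)
          · exact Or.inl ⟨m, hm, h⟩
          · exact Or.inr (Or.inl (h ▸ hm))
          · exact Or.inr (Or.inr h)
        · rintro (⟨m, hm, h⟩ | h | h)
          · exact Or.inl ⟨m, hm, Or.inl h⟩
          · exact Or.inl ⟨n, h, Or.inr rfl⟩
          · exact Or.inr h

-- ===== VERDICT (by name: the statement is the Claim_ definition above) =====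
theorem detect_number_return_after_trigger_spec : Claim_equal_detect_number_return_after_trigger := by
  intro numbers history_window _
  unfold Spec_detect_number_return_after_trigger
  unfold detect_number_return_after_trigger detect_number_return_after_trigger_alt
  by_cases h : numbers.length < 4
  · simp [h]
  · rw [if_neg h, if_neg h]
    rw [pvSeenLoop_eq, pvLoopI_eq, List.drop_zero]
    have : ∀ xs : List Int, xs.any (fun n => PySem.Set.contains PySem.Set.empty n) = false := by
      intro xs; simp [PySem.Set.empty, PySem.Set.contains]
    rw [this, Bool.false_or]
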